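-- pv_equiv track=rewrite | github.com/sreese011/Cordea_Data_Definitive_ClayData | scripts/definitive_pull.py | infer_address_columns
-- ===== SOURCE A (Python) =====
-- def infer_address_columns(cols: list[str]) -> str | None:
--     """Return the best column name for address, or None."""
--     lower_cols = [c.lower() for c in cols]
--     for cand in ["address", "hospital_address", "address1", "full_address", "street", "location"]:
--         for i, lc in enumerate(lower_cols):
--             if cand in lc:
--                 return cols[i]
--     # Try combined
--     if "city" in lower_cols and "state" in lower_cols:
--         return None  # Caller can build from parts
--     return None
-- ===== SOURCE B (Python) =====
-- _CANDS = ["address", "hospital_address", "address1", "full_address", "street", "location"]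
--
-- def infer_address_columns(cols: list[str]) -> str | None:
--     """Return the best column name for address, or None."""
--     best = None  # ((priority, column_index), column)
--     for i, c in enumerate(cols):
--         lc = c.lower()
--         score = next((p for p, cand in enumerate(_CANDS) if cand in lc), None)
--         if score is not None and (best is None or (score, i) < best[0]):
--             best = ((score, i), c)
--     return best[1] if best is not None else None
-- ===== Notes on version B (the rewrite author's own statement) =====
-- stated objective: alternative
-- what changed: Replaced the candidate-major nested early-return scan by a single left-to-right pass over the columns that scores each column (first matching candidate's priority index) and keeps the argmin of (priority, column index); the dead city/state branch is dropped.
import Mathlib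
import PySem

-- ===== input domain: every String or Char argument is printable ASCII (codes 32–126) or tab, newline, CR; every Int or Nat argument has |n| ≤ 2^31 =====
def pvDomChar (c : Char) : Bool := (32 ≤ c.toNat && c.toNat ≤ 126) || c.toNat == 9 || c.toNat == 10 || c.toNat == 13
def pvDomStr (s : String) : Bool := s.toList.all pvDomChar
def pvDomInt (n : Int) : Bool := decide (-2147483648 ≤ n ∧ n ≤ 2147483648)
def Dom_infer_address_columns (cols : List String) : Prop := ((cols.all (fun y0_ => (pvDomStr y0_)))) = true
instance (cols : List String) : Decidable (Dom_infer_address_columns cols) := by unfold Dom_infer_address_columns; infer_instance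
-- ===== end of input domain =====

-- B replaces A's candidate-major nested early-return scan by one pass over the columns
-- keeping the argmin of (candidate-priority, column-index); same results, alternative shape.

-- ===== PORT A =====
-- priority candidates, in order
def pvCands : List String := ["address", "hospital_address", "address1", "full_address", "street", "location"]

-- inner loop: 'for i, lc in enumerate(lower_cols): if cand in lc: return cols[i]'
def pvFindMatch (cand : String) : List String → List String → Option String
  | c :: cs, l :: ls => if PySem.Str.isIn cand l then some c else pvFindMatch cand cs ls
  | _, _ => none

-- outer loop over the candidate list
def pvScan (cols lower : List String) : List String → Option String
  | [] => none
  | cand :: rest =>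
    match pvFindMatch cand cols lower with
    | some c => some c
    | none => pvScan cols lower rest

def infer_address_columns (cols : List String) : Option String :=
  let lower := cols.map PySem.Str.lower
  match pvScan cols lower pvCands with
  | some c => some c
  | none => if lower.contains "city" && lower.contains "state" then none else none

-- ===== PORT B =====
-- 'next((p for p, cand in enumerate(_CANDS) if cand in lc), None)'
def pvScore : List (Int × String) → String → Option Int
  | [], _ => none
  | (p, cand) :: rest, lc => if PySem.Str.isIn cand lc then some p else pvScore rest lc

-- Python tuple '<' on (int, int)
def pvLexLt (a b : Int × Int) : Bool := a.1 < b.1 || (a.1 == b.1 && a.2 < b.2)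

-- one iteration of B's 'for i, c in enumerate(cols)' loop body
def pvStep (best : Option ((Int × Int) × String)) (ic : Int × String) : Option ((Int × Int) × String) :=
  let lc := PySem.Str.lower ic.2
  match pvScore (PySem.List.enumerate pvCands 0) lc with
  | none => best
  | some p =>
    match best with
    | none => some ((p, ic.1), ic.2)
    | some (k, d) => if pvLexLt (p, ic.1) k then some ((p, ic.1), ic.2) else some (k, d)

def infer_address_columns_alt (cols : List String) : Option String :=
  match (PySem.List.enumerate cols 0).foldl pvStep none with
  | none => none
  | some (_, c) => some c

-- ===== PRECONDITION & SPEC =====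
def Spec_infer_address_columns (cols : List String) (out : Option String) : Prop := out = infer_address_columns_alt cols
instance (cols : List String) (out : Option String) : Decidable (Spec_infer_address_columns cols out) := by unfold Spec_infer_address_columns; infer_instance

-- ===== CLAIM (what is proved, stated in full; the proofs are below) =====
def Claim_equal_infer_address_columns : Prop := ∀ (cols : List String), Dom_infer_address_columns cols → Spec_infer_address_columns cols (infer_address_columns cols)

-- ===== LEMMAS AND PROOFS =====

-- "first candidate index matching lc", in the increment form used by the proofs
def bkL : List String → String → Option Int
  | [], _ => none
  | cand :: rest, lc => if PySem.Str.isIn cand lc then some 0 else (bkL rest lc).map (· + 1)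

-- canonical argmin of (candidate priority, column index), earliest column wins ties
def specFI (L : List String) : Int → List String → Option ((Int × Int) × String)
  | _, [] => none
  | n, c :: cs =>
    match bkL L (PySem.Str.lower c), specFI L (n + 1) cs with
    | none, r => r
    | some p, none => some ((p, n), c)
    | some p, some ((q, j), d) => if q < p then some ((q, j), d) else some ((p, n), c)

theorem pvScore_eq_bkL (P : List String) (lc : String) (k : Int) :
    pvScore (PySem.List.enumerate P k) lc = (bkL P lc).map (· + k) := by
  induction P generalizing k with
  | nil => simp [pvScore, bkL, PySem.List.enumerate_nil]
  | cons cand rest ih =>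
    simp only [PySem.List.enumerate_cons, pvScore, bkL]
    by_cases h : PySem.Chars.isIn cand.toList lc.toList = true
    · simp [h]
    · simp [h, ih (k + 1)]
      cases bkL rest lc <;> simp <;> ring

theorem bkL_nonneg (L : List String) (lc : String) (p : Int) (h : bkL L lc = some p) : 0 ≤ p := by
  induction L generalizing p with
  | nil => simp [bkL] at h
  | cons cand rest ih =>
    simp only [bkL] at h
    split at h
    · cases h; omega
    · cases hr : bkL rest lc with
      | none => simp [hr] at h
      | some q => simp [hr] at h; have := ih q hr; omega

theorem specFI_idx_ge (L : List String) (cols : List String) (n : Int) (p i : Int) (c : String)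
    (h : specFI L n cols = some ((p, i), c)) : n ≤ i := by
  induction cols generalizing n with
  | nil => simp [specFI] at h
  | cons c' cs ih =>
    simp only [specFI] at h
    split at h
    · have := ih (n + 1) h; omega
    · cases h; omega
    · split at h
      · cases h; have := ih (n + 1) (by assumption); omega
      · cases h; omega

theorem specFI_key_nonneg (L : List String) (cols : List String) (n : Int) (p i : Int) (c : String)
    (h : specFI L n cols = some ((p, i), c)) : 0 ≤ p := by
  induction cols generalizing n with
  | nil => simp [specFI] at h
  | cons c' cs ih =>
    simp only [specFI] at h
    split at h
    · exact ih (n + 1) h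
    · cases h; exact bkL_nonneg _ _ _ (by assumption)
    · split at h
      · cases h; exact ih (n + 1) (by assumption)
      · cases h; exact bkL_nonneg _ _ _ (by assumption)

theorem specFI_nil_cands (cols : List String) (n : Int) : specFI [] n cols = none := by
  induction cols generalizing n with
  | nil => simp [specFI]
  | cons c cs ih => simp [specFI, bkL, ih]

-- no column matches cand: prepending cand shifts every priority by one
theorem specFI_shift (cand : String) (L : List String) (cols : List String) (n : Int)
    (h : pvFindMatch cand cols (cols.map PySem.Str.lower) = none) :
    specFI (cand :: L) n cols
      = (specFI L n cols).map (fun x => ((x.1.1 + 1, x.1.2), x.2)) := by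
  induction cols generalizing n with
  | nil => simp [specFI]
  | cons c cs ih =>
    simp only [List.map_cons, pvFindMatch] at h
    by_cases hc : PySem.Chars.isIn cand.toList (PySem.Chars.lower c.toList) = true
    · simp [hc] at h
    · simp [hc] at h
      rw [show specFI (cand :: L) n (c :: cs) =
            match bkL (cand :: L) (PySem.Str.lower c), specFI (cand :: L) (n + 1) cs with
            | none, r => r
            | some p, none => some ((p, n), c)
            | some p, some ((q, j), d) => if q < p then some ((q, j), d) else some ((p, n), c)
          from rfl,
          show specFI L n (c :: cs) =
            match bkL L (PySem.Str.lower c), specFI L (n + 1) cs with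
            | none, r => r
            | some p, none => some ((p, n), c)
            | some p, some ((q, j), d) => if q < p then some ((q, j), d) else some ((p, n), c)
          from rfl,
          ih (n + 1) h]
      simp only [bkL]
      rw [if_neg (by simp [hc])]
      cases hb : bkL L (PySem.Str.lower c) with
      | none => simp
      | some p =>
        simp only [Option.map_some]
        cases ht : specFI L (n + 1) cs with
        | none => simp
        | some r =>
          obtain ⟨⟨q, j⟩, d⟩ := r
          simp only [Option.map_some]
          by_cases hq : q < p
          · simp [hq, show q + 1 < p + 1 by omega]
          · simp [hq, show ¬ q + 1 < p + 1 by omega]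

-- the first column matching cand wins with priority 0 once cand heads the list
theorem specFI_first (cand : String) (L : List String) (cols : List String) (n : Int) (c : String)
    (h : pvFindMatch cand cols (cols.map PySem.Str.lower) = some c) :
    ∃ j, specFI (cand :: L) n cols = some ((0, j), c) := by
  induction cols generalizing n with
  | nil => simp [pvFindMatch] at h
  | cons c' cs ih =>
    simp only [List.map_cons, pvFindMatch] at h
    by_cases hc : PySem.Str.isIn cand (PySem.Str.lower c') = true
    · simp only [hc, if_true, Option.some.injEq] at h
      subst h
      refine ⟨n, ?_⟩
      simp only [specFI, bkL, hc, if_true]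
      cases ht : specFI (cand :: L) (n + 1) cs with
      | none => rfl
      | some r =>
        obtain ⟨⟨q, j⟩, d⟩ := r
        have hq := specFI_key_nonneg _ _ _ _ _ _ ht
        simp [show ¬ q < 0 by omega]
    · simp only [hc, if_false, Bool.false_eq_true] at h
      obtain ⟨j, hj⟩ := ih (n + 1) h
      simp only [specFI, bkL, hc, if_false, Bool.false_eq_true, hj]
      cases hb : bkL L (PySem.Str.lower c') with
      | none => exact ⟨j, rfl⟩
      | some p =>
        have hp := bkL_nonneg _ _ _ hb
        simp only [Option.map_some]
        exact ⟨j, by simp [show (0:Int) < p + 1 by omega]⟩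

-- A's scan equals the argmin's column
theorem scan_eq_specFI (L : List String) (cols : List String) (n : Int) :
    pvScan cols (cols.map PySem.Str.lower) L = (specFI L n cols).map (·.2) := by
  induction L with
  | nil => simp [pvScan, specFI_nil_cands]
  | cons cand rest ih =>
    simp only [pvScan]
    cases h : pvFindMatch cand cols (cols.map PySem.Str.lower) with
    | some c =>
      obtain ⟨j, hj⟩ := specFI_first cand rest cols n c h
      simp [hj]
    | none =>
      rw [ih, specFI_shift cand rest cols n h]
      cases specFI rest n cols <;> simp

def pvMerge (acc r : Option ((Int × Int) × String)) : Option ((Int × Int) × String) :=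
  match r with
  | none => acc
  | some ((p, i), c) =>
    match acc with
    | none => some ((p, i), c)
    | some ((q, j), d) => if pvLexLt (p, i) (q, j) then some ((p, i), c) else some ((q, j), d)

-- one step of B's fold, expressed through bkL
theorem pvStep_bkL (acc : Option ((Int × Int) × String)) (n : Int) (c : String) :
    pvStep acc (n, c) =
      match bkL pvCands (PySem.Str.lower c), acc with
      | none, acc => acc
      | some p, none => some ((p, n), c)
      | some p, some (k, d) => if pvLexLt (p, n) k then some ((p, n), c) else some (k, d) := by
  simp only [pvStep, pvScore_eq_bkL pvCands (PySem.Str.lower c) 0]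
  cases bkL pvCands (PySem.Str.lower c) <;> cases acc <;> simp

-- B's fold accumulates exactly the argmin merge
theorem foldl_step_eq (cols : List String) (n : Int) (acc : Option ((Int × Int) × String))
    (hacc : ∀ q j d, acc = some ((q, j), d) → j < n) :
    (PySem.List.enumerate cols n).foldl pvStep acc = pvMerge acc (specFI pvCands n cols) := by
  induction cols generalizing n acc with
  | nil => simp [PySem.List.enumerate_nil, specFI, pvMerge]
  | cons c cs ih =>
    rw [PySem.List.enumerate_cons, List.foldl_cons, pvStep_bkL]
    cases hb : bkL pvCands (PySem.Str.lower c) with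
    | none =>
      simp only [specFI, hb]
      exact ih (n + 1) acc (fun q j d h => by have := hacc q j d h; omega)
    | some p =>
      have hp : 0 ≤ p := bkL_nonneg _ _ _ hb
      simp only [specFI, hb]
      cases hac : acc with
      | none =>
        simp only
        rw [ih (n + 1) (some ((p, n), c)) (by intro q j d h; cases h; omega)]
        cases ht : specFI pvCands (n + 1) cs with
        | none => simp [pvMerge]
        | some r =>
          obtain ⟨⟨q', j'⟩, d'⟩ := r
          have hj' := specFI_idx_ge _ _ _ _ _ _ ht
          simp only [pvMerge, pvLexLt]
          by_cases hq : q' < p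
          · simp [hq, show ¬ p < q' by omega, show ¬ p = q' by omega]
          · by_cases he : q' = p
            · simp [he, show ¬ p < p by omega, show ¬ j' < n by omega]
            · simp [hq, show p < q' by omega]
              omega
      | some kd =>
        obtain ⟨⟨q, j⟩, d⟩ := kd
        have hjn : j < n := hacc q j d hac
        have hlt : pvLexLt (p, n) ((q, j)) = decide (p < q) := by
          simp only [pvLexLt]
          by_cases h1 : p < q
          · simp [h1]
          · simp [h1, show ¬ n < j by omega]
        simp only [hlt]
        by_cases hpq : p < q
        · simp only [hpq, decide_true, if_true]
          rw [ih (n + 1) (some ((p, n), c)) (by intro q' j' d' h; cases h; omega)]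
          cases ht : specFI pvCands (n + 1) cs with
          | none => simp [pvMerge, pvLexLt, hpq]
          | some r =>
            obtain ⟨⟨q', j'⟩, d'⟩ := r
            have hj' := specFI_idx_ge _ _ _ _ _ _ ht
            simp only [pvMerge, pvLexLt]
            by_cases hq : q' < p
            · simp [hq, show ¬ p < q' by omega, show ¬ p = q' by omega,
                    show q' < q by omega, show ¬ j' < j by omega]
            · by_cases he : q' = p
              · simp [he, show ¬ p < p by omega, show ¬ j' < n by omega,
                      show p < q by omega]
              · simp [hq, show p < q' by omega, hpq]
                omega
        · simp only [hpq, decide_false, Bool.false_eq_true, if_false]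
          rw [ih (n + 1) (some ((q, j), d)) (by intro q' j' d' h; cases h; omega)]
          cases ht : specFI pvCands (n + 1) cs with
          | none =>
            simp [pvMerge, pvLexLt, show ¬ n < j by omega, hpq]
          | some r =>
            obtain ⟨⟨q', j'⟩, d'⟩ := r
            have hj' := specFI_idx_ge _ _ _ _ _ _ ht
            simp only [pvMerge, pvLexLt]
            by_cases hq2 : q' < p
            · simp [hq2]
            · simp [hq2, show ¬ q' < q by omega, show q' = q → ¬ j' < j by omega,
                    hpq, show ¬ n < j by omega]
              omega

-- ===== VERDICT (by name: the statement is the Claim_ definition above) =====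
theorem infer_address_columns_spec : Claim_equal_infer_address_columns := by
  intro cols _
  unfold Spec_infer_address_columns infer_address_columns infer_address_columns_alt
  rw [foldl_step_eq cols 0 none (by intro q j d h; cases h)]
  simp only [scan_eq_specFI pvCands cols 0]
  cases h : specFI pvCands 0 cols with
  | none => simp [pvMerge]
  | some r => obtain ⟨⟨p, i⟩, c⟩ := r; simp [pvMerge]
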